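-- pv_equiv track=rewrite | github.com/haodingkui/financial-information-extraction | annual_report_extractor.py | get_end_word_of_table
-- ===== SOURCE A (Python) =====
-- def get_end_word_of_table(table):
--     """获取表格的结束词"""
--     end_word_of_table = ''
--     # 获取表格的右下角最后一个词
--     for row in reversed(table[0:len(table)]):
--         find_flag = False
--         for k2 in reversed(row):
--             if k2 is not None and k2 != "":
--                 end_word_of_table = k2
--                 find_flag = True
--                 break
--         if find_flag:
--             break
--     # 如果单元格内容过长，则截取其最后10个字符作为关键词
--     if len(end_word_of_table) > 50:
--         end_word_of_table = end_word_of_table[-10:]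
--     # 如果单元格内容包含换行符，截取前半段
--     if "\n" in end_word_of_table:
--         end_word_of_table = end_word_of_table[0:end_word_of_table.index("\n")]
--     return end_word_of_table
-- ===== SOURCE B (Python) =====
-- def get_end_word_of_table(table):
--     """Single forward accumulator pass instead of reverse scan with early exits."""
--     end_word_of_table = ''
--     for row in table:
--         for cell in row:
--             if cell is not None and cell != "":
--                 end_word_of_table = cell
--     if len(end_word_of_table) > 50:
--         end_word_of_table = end_word_of_table[-10:]
--     if "\n" in end_word_of_table:
--         end_word_of_table = end_word_of_table[0:end_word_of_table.index("\n")]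
--     return end_word_of_table
-- ===== Notes on version B (the rewrite author's own statement) =====
-- stated objective: simpler
-- what changed: Replaced A's reversed nested scan with break-flags by a single forward pass that overwrites one accumulator with every non-empty cell, keeping the identical truncation; no flags, no reversals, no early exits.
import Mathlib
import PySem

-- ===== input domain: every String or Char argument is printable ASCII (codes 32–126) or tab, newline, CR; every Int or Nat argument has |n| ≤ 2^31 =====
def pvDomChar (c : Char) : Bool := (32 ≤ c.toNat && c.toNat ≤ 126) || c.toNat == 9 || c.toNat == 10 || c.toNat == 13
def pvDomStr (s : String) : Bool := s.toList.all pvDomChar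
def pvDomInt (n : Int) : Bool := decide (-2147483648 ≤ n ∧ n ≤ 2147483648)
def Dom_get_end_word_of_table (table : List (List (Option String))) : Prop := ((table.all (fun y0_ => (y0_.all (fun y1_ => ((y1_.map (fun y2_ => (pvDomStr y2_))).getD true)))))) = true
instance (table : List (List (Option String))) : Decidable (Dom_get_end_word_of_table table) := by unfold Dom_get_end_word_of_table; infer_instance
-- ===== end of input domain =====

-- B replaces A's reversed nested scan with break-flags by one forward accumulator pass (simpler; same cost).

-- ===== PORT A =====
-- inner loop 'for k2 in reversed(row): if k2 is not None and k2 != "": …; break' — first hit, scanning the given list front-to-back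
def pvRowScanA : List (Option String) → Option String
  | [] => none
  | c :: rest =>
    match c with
    | some s => if s ≠ "" then some s else pvRowScanA rest
    | none => pvRowScanA rest

-- outer loop 'for row in reversed(table[0:len(table)]): …; if find_flag: break'
def pvTableFindA : List (List (Option String)) → Option String
  | [] => none
  | r :: rest =>
    match pvRowScanA r.reverse with
    | some s => some s
    | none => pvTableFindA rest

def get_end_word_of_table (table : List (List (Option String))) : String :=
  let w := (pvTableFindA table.reverse).getD ""
  let w := if PySem.Str.len w > 50 then PySem.Str.slice w (some (-10)) none else w
  if PySem.Str.isIn "\n" w then PySem.Str.slice w (some 0) (some (PySem.Str.find w "\n")) else w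

-- ===== PORT B =====
def get_end_word_of_table_alt (table : List (List (Option String))) : String :=
  let w := table.foldl
    (fun acc row => row.foldl
      (fun a c =>
        match c with
        | some s => if s ≠ "" then s else a
        | none => a) acc) ""
  let w := if PySem.Str.len w > 50 then PySem.Str.slice w (some (-10)) none else w
  if PySem.Str.isIn "\n" w then PySem.Str.slice w (some 0) (some (PySem.Str.find w "\n")) else w

-- ===== PRECONDITION & SPEC =====
def Spec_get_end_word_of_table (table : List (List (Option String))) (out : String) : Prop := out = get_end_word_of_table_alt table
instance (table : List (List (Option String))) (out : String) : Decidable (Spec_get_end_word_of_table table out) := by unfold Spec_get_end_word_of_table; infer_instance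

-- ===== CLAIM (what is proved, stated in full; the proofs are below) =====
def Claim_equal_get_end_word_of_table : Prop := ∀ (table : List (List (Option String))), Dom_get_end_word_of_table table → Spec_get_end_word_of_table table (get_end_word_of_table table)

-- ===== LEMMAS AND PROOFS =====

theorem pvRowScanA_append (l m : List (Option String)) :
    pvRowScanA (l ++ m) =
      match pvRowScanA l with
      | some s => some s
      | none => pvRowScanA m := by
  induction l with
  | nil => simp [pvRowScanA]
  | cons c rest ih =>
    cases c with
    | none => simpa [pvRowScanA] using ih
    | some s =>
      by_cases h : s = "" <;> simp [pvRowScanA, h, ih]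

theorem pvRowScanA_fold (row : List (Option String)) (a : String) :
    row.foldl
      (fun a c =>
        match c with
        | some s => if s ≠ "" then s else a
        | none => a) a = (pvRowScanA row.reverse).getD a := by
  induction row generalizing a with
  | nil => simp [pvRowScanA]
  | cons c rest ih =>
    simp only [List.foldl_cons, List.reverse_cons, ih, pvRowScanA_append]
    cases hsc : pvRowScanA rest.reverse with
    | some s => simp
    | none =>
      cases c with
      | none => simp [pvRowScanA]
      | some s => by_cases h : s = "" <;> simp [pvRowScanA, h]

theorem pvTableFindA_append (l m : List (List (Option String))) :
    pvTableFindA (l ++ m) =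
      match pvTableFindA l with
      | some s => some s
      | none => pvTableFindA m := by
  induction l with
  | nil => simp [pvTableFindA]
  | cons r rest ih =>
    cases h : pvRowScanA r.reverse with
    | some s => simp [pvTableFindA, h]
    | none => simp [pvTableFindA, h, ih]

theorem pvTableFindA_fold (table : List (List (Option String))) (a : String) :
    table.foldl
      (fun acc row => row.foldl
        (fun a c =>
          match c with
          | some s => if s ≠ "" then s else a
          | none => a) acc) a = (pvTableFindA table.reverse).getD a := by
  induction table generalizing a with
  | nil => simp [pvTableFindA]
  | cons r rest ih =>
    rw [List.foldl_cons, ih, pvRowScanA_fold r a, List.reverse_cons, pvTableFindA_append]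
    cases hsc : pvTableFindA rest.reverse with
    | some s => simp
    | none =>
      cases h : pvRowScanA r.reverse with
      | some s => simp [pvTableFindA, h]
      | none => simp [pvTableFindA, h]

-- ===== VERDICT (by name: the statement is the Claim_ definition above) =====
theorem get_end_word_of_table_spec : Claim_equal_get_end_word_of_table := by
  intro table _
  unfold Spec_get_end_word_of_table get_end_word_of_table get_end_word_of_table_alt
  rw [pvTableFindA_fold]
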